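-- pv_equiv track=rewrite | github.com/apusharma45/veridra-core | src/veridra/providers/openai.py | _is_transient_message
-- ===== SOURCE A (Python) =====
-- def _is_transient_message(message: str) -> bool:
--     lowered = message.lower()
--     transient_markers = (
--         "429",
--         "500",
--         "502",
--         "503",
--         "504",
--         "rate limit",
--         "connection",
--         "temporarily unavailable",
--         "service unavailable",
--     )
--     return any(marker in lowered for marker in transient_markers)
-- ===== SOURCE B (Python) =====
-- _MARKERS = (
--     "429",
--     "500",
--     "502",
--     "503",
--     "504",
--     "rate limit",
--     "connection",
--     "temporarily unavailable",
--     "service unavailable",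
-- )
--
--
-- def _is_transient_message(message: str) -> bool:
--     lowered = message.lower()
--     for i in range(len(lowered)):
--         for marker in _MARKERS:
--             if lowered.startswith(marker, i):
--                 return True
--     return False
-- ===== Notes on version B (the rewrite author's own statement) =====
-- stated objective: alternative
-- what changed: B makes one left-to-right scan over the positions of the lowered string, testing all nine markers as prefixes at each position with early exit, instead of A's nine independent whole-string substring scans.
import Mathlib
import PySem

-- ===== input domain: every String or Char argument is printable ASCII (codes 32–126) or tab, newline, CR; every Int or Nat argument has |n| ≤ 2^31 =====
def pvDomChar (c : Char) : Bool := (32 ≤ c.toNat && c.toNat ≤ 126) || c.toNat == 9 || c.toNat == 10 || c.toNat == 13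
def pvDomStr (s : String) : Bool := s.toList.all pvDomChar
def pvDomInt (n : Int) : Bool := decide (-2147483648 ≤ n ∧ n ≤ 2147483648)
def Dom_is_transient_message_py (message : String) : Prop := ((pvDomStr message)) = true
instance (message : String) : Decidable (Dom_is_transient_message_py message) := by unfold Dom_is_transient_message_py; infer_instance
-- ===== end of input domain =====

-- B replaces A's nine independent substring scans by one left-to-right scan over
-- positions, testing each marker as a prefix at each position (alternative; same cost).

-- ===== PORT A =====
def is_transient_message_py (message : String) : Bool :=
  let lowered := PySem.Str.lower message
  let transient_markers : List String :=
    ["429", "500", "502", "503", "504", "rate limit", "connection",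
     "temporarily unavailable", "service unavailable"]
  transient_markers.any (fun marker => PySem.Str.isIn marker lowered)

-- ===== PORT B =====
def pvMarkers : List (List Char) :=
  ["429".toList, "500".toList, "502".toList, "503".toList, "504".toList,
   "rate limit".toList, "connection".toList,
   "temporarily unavailable".toList, "service unavailable".toList]

-- the position loop: at each position try every marker as a prefix, else advance
def pvScan : List Char → Bool
  | [] => false
  | c :: rest =>
    pvMarkers.any (fun marker => PySem.Chars.startswith (c :: rest) marker) || pvScan rest

def is_transient_message_py_alt (message : String) : Bool :=
  let lowered := PySem.Str.lower message
  pvScan lowered.toList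

-- ===== PRECONDITION & SPEC =====
def Spec_is_transient_message_py (message : String) (out : Bool) : Prop := out = is_transient_message_py_alt message
instance (message : String) (out : Bool) : Decidable (Spec_is_transient_message_py message out) := by unfold Spec_is_transient_message_py; infer_instance

-- ===== CLAIM (what is proved, stated in full; the proofs are below) =====
def Claim_equal_is_transient_message_py : Prop := ∀ (message : String), Dom_is_transient_message_py message → Spec_is_transient_message_py message (is_transient_message_py message)

-- ===== LEMMAS AND PROOFS =====

theorem pvScan_iff (s : List Char) :
    pvScan s = true ↔ ∃ m ∈ pvMarkers, m <:+: s := by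
  induction s with
  | nil => simp [pvScan]; decide
  | cons c rest ih =>
    simp only [pvScan, Bool.or_eq_true, List.any_eq_true,
      PySem.Chars.startswith_iff, ih, List.infix_cons_iff]
    constructor
    · rintro (⟨m, hm, h⟩ | ⟨m, hm, h⟩)
      · exact ⟨m, hm, Or.inl h⟩
      · exact ⟨m, hm, Or.inr h⟩
    · rintro ⟨m, hm, h | h⟩
      · exact Or.inl ⟨m, hm, h⟩
      · exact Or.inr ⟨m, hm, h⟩

theorem is_transient_message_py_spec : Claim_equal_is_transient_message_py := by
  intro message _
  unfold Spec_is_transient_message_py is_transient_message_py is_transient_message_py_alt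
  rw [Bool.eq_iff_iff, List.any_eq_true, pvScan_iff]
  have hmap : pvMarkers = (["429", "500", "502", "503", "504", "rate limit", "connection",
      "temporarily unavailable", "service unavailable"] : List String).map String.toList := rfl
  rw [hmap]
  simp only [List.mem_map]
  constructor
  · rintro ⟨m, hm, h⟩
    exact ⟨m.toList, ⟨m, hm, rfl⟩, (PySem.Str.isIn_iff_infix _ _).mp h⟩
  · rintro ⟨_, ⟨m, hm, rfl⟩, h⟩
    exact ⟨m, hm, (PySem.Str.isIn_iff_infix _ _).mpr h⟩
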